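-- pv_equiv track=rewrite | github.com/REASY/k8s-ariadne-rs | python/agent/src/k8s_graph_agent/cypher_validator/compatibility.py | _case_when_has_multiple_values
-- ===== SOURCE A (Python) =====
-- def _case_when_has_multiple_values(stripped: str) -> bool:
--     text = stripped
--     upper = text.upper()
--     i = 0
--     depth_paren = 0
--     depth_bracket = 0
--     depth_brace = 0
--     in_when = False
--     comma_in_when = False
--     while i < len(text):
--         char = text[i]
--         if char == "(":
--             depth_paren += 1
--         elif char == ")":
--             depth_paren = max(0, depth_paren - 1)
--         elif char == "[":
--             depth_bracket += 1
--         elif char == "]":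
--             depth_bracket = max(0, depth_bracket - 1)
--         elif char == "{":
--             depth_brace += 1
--         elif char == "}":
--             depth_brace = max(0, depth_brace - 1)
--
--         if depth_paren == 0 and depth_bracket == 0 and depth_brace == 0:
--             if upper.startswith("WHEN", i):
--                 in_when = True
--                 comma_in_when = False
--                 i += 4
--                 continue
--             if in_when and upper.startswith("THEN", i):
--                 if comma_in_when:
--                     return True
--                 in_when = False
--                 i += 4
--                 continue
--             if in_when and char == ",":
--                 comma_in_when = True
--         i += 1
--     return False
-- ===== SOURCE B (Python) =====
-- def _case_when_has_multiple_values(stripped: str) -> bool: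
--     # pass 1: compute the clamped bracket depths once and record a top-level mask
--     toplevel = []
--     dp = db = dc = 0
--     for ch in stripped:
--         if ch == "(":
--             dp += 1
--         elif ch == ")":
--             dp = max(0, dp - 1)
--         elif ch == "[":
--             db += 1
--         elif ch == "]":
--             db = max(0, db - 1)
--         elif ch == "{":
--             dc += 1
--         elif ch == "}":
--             dc = max(0, dc - 1)
--         toplevel.append(dp == 0 and db == 0 and dc == 0)
--     # pass 2: WHEN/THEN/comma state machine gated by the mask, brackets ignored
--     upper = stripped.upper()
--     n = len(stripped)
--     in_when = comma_in_when = False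
--     i = 0
--     while i < n:
--         if toplevel[i]:
--             if upper.startswith("WHEN", i):
--                 in_when, comma_in_when = True, False
--                 i += 4
--                 continue
--             if in_when and upper.startswith("THEN", i):
--                 if comma_in_when:
--                     return True
--                 in_when = False
--                 i += 4
--                 continue
--             if in_when and stripped[i] == ",":
--                 comma_in_when = True
--         i += 1
--     return False
-- ===== Notes on version B (the rewrite author's own statement) =====
-- stated objective: alternative
-- what changed: B splits A's single fused loop into two passes: one fold that precomputes the per-type clamped bracket depths into a boolean top-level mask, and a separate WHEN/THEN/comma state machine that carries no depth counters and is gated by the mask.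
import Mathlib
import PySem

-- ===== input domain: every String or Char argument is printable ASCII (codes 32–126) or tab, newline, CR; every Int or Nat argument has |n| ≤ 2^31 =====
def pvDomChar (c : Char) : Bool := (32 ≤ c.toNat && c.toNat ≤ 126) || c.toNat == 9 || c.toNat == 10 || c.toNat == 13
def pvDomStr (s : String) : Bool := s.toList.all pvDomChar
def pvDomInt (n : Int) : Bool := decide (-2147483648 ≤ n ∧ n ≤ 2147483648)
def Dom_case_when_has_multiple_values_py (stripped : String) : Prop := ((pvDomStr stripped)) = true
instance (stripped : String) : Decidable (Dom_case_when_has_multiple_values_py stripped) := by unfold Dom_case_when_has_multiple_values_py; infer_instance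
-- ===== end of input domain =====

-- B is an alternative decomposition of A: a first pass precomputes the bracket-depth
-- top-level mask, a second pass runs the WHEN/THEN/comma state machine gated by it.

-- ===== PORT A =====
-- shared primitive: Python's  s.startswith(pat, i)
def pvStartsAt (u : List Char) (pat : List Char) (i : Nat) : Bool :=
  pat.isPrefixOf (u.drop i)

-- the while-loop of A: index, three clamped depth counters, in_when / comma_in_when
-- (fuel is a totality guard only; t.length steps always suffice since i grows each turn)
def pvALoop (t u : List Char) : Nat → Nat → Int → Int → Int → Bool → Bool → Bool
  | 0, _, _, _, _, _, _ => false
  | fuel + 1, i, dp, db, dc, inWhen, comma =>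
    if h : i < t.length then
      let c := t[i]
      let dp' := if c = '(' then dp + 1 else if c = ')' then max 0 (dp - 1) else dp
      let db' := if c = '[' then db + 1 else if c = ']' then max 0 (db - 1) else db
      let dc' := if c = '{' then dc + 1 else if c = '}' then max 0 (dc - 1) else dc
      if dp' = 0 ∧ db' = 0 ∧ dc' = 0 then
        if pvStartsAt u ['W','H','E','N'] i then
          pvALoop t u fuel (i + 4) dp' db' dc' true false
        else if inWhen && pvStartsAt u ['T','H','E','N'] i then
          if comma then true
          else pvALoop t u fuel (i + 4) dp' db' dc' false comma
        else if inWhen && decide (c = ',') then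
          pvALoop t u fuel (i + 1) dp' db' dc' inWhen true
        else
          pvALoop t u fuel (i + 1) dp' db' dc' inWhen comma
      else
        pvALoop t u fuel (i + 1) dp' db' dc' inWhen comma
    else false

def case_when_has_multiple_values_py (stripped : String) : Bool :=
  let t := stripped.toList
  let u := PySem.Chars.upper t
  pvALoop t u t.length 0 0 0 0 false false

-- ===== PORT B =====
-- pass 1 of B: fold the per-char clamped depth update over the string
def pvBStep (d : Int × Int × Int) (c : Char) : Int × Int × Int :=
  ((if c = '(' then d.1 + 1 else if c = ')' then max 0 (d.1 - 1) else d.1),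
   (if c = '[' then d.2.1 + 1 else if c = ']' then max 0 (d.2.1 - 1) else d.2.1),
   (if c = '{' then d.2.2 + 1 else if c = '}' then max 0 (d.2.2 - 1) else d.2.2))

def pvBAllZero (d : Int × Int × Int) : Bool :=
  decide (d.1 = 0 ∧ d.2.1 = 0 ∧ d.2.2 = 0)

-- one iteration of B's first pass: append toplevel[i], carry the new depths
def pvBMaskF (st : List Bool × (Int × Int × Int)) (c : Char) : List Bool × (Int × Int × Int) :=
  (st.1 ++ [pvBAllZero (pvBStep st.2 c)], pvBStep st.2 c)

-- toplevel.append(...) inside the for-loop of B's first pass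
def pvBMask (t : List Char) : List Bool :=
  (t.foldl pvBMaskF ([], (0, 0, 0))).1

-- pass 2 of B: WHEN/THEN/comma state machine, no depth counters, gated by the mask
-- (fuel is a totality guard only; t.length steps always suffice since i grows each turn)
def pvBLoop (t u : List Char) (mask : List Bool) : Nat → Nat → Bool → Bool → Bool
  | 0, _, _, _ => false
  | fuel + 1, i, inWhen, comma =>
    if i < t.length then
      if mask.getD i false then   -- toplevel[i]; in range because mask has one entry per char
        if pvStartsAt u ['W','H','E','N'] i then
          pvBLoop t u mask fuel (i + 4) true false
        else if inWhen && pvStartsAt u ['T','H','E','N'] i then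
          if comma then true
          else pvBLoop t u mask fuel (i + 4) false comma
        else if inWhen && decide (t.getD i ' ' = ',') then
          pvBLoop t u mask fuel (i + 1) inWhen true
        else
          pvBLoop t u mask fuel (i + 1) inWhen comma
      else
        pvBLoop t u mask fuel (i + 1) inWhen comma
    else false

def case_when_has_multiple_values_py_alt (stripped : String) : Bool :=
  let t := stripped.toList
  let u := PySem.Chars.upper t
  pvBLoop t u (pvBMask t) t.length 0 false false

-- ===== PRECONDITION & SPEC =====
def Spec_case_when_has_multiple_values_py (stripped : String) (out : Bool) : Prop := out = case_when_has_multiple_values_py_alt stripped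
instance (stripped : String) (out : Bool) : Decidable (Spec_case_when_has_multiple_values_py stripped out) := by unfold Spec_case_when_has_multiple_values_py; infer_instance

-- ===== CLAIM (what is proved, stated in full; the proofs are below) =====
def Claim_equal_case_when_has_multiple_values_py : Prop := ∀ (stripped : String), Dom_case_when_has_multiple_values_py stripped → Spec_case_when_has_multiple_values_py stripped (case_when_has_multiple_values_py stripped)

-- ===== LEMMAS AND PROOFS =====

-- clamped depths after the first i characters
def pvDepths (t : List Char) (i : Nat) : Int × Int × Int :=
  (t.take i).foldl pvBStep (0, 0, 0)

theorem pvDepths_succ (t : List Char) (i : Nat) (h : i < t.length) :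
    pvDepths t (i + 1) = pvBStep (pvDepths t i) t[i] := by
  have ht : t.take (i + 1) = t.take i ++ [t[i]] := by
    rw [List.take_add_one, List.getElem?_eq_getElem h]; rfl
  unfold pvDepths
  rw [ht, List.foldl_append]
  rfl

theorem pvBStep_fix (d : Int × Int × Int) (c : Char)
    (h : PySem.Chars.upperChar c ∈ (['W','H','E','N','T'] : List Char)) :
    pvBStep d c = d := by
  unfold pvBStep
  split_ifs with h1 h2 h3 h4 h5 h6 <;>
    first
      | (exfalso; subst_vars; revert h; decide)
      | rfl

theorem pvMask_fold_acc (t : List Char) (acc : List Bool) (d : Int × Int × Int) :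
    (t.foldl pvBMaskF (acc, d)).1 = acc ++ (t.foldl pvBMaskF ([], d)).1 := by
  induction t generalizing acc d with
  | nil => simp
  | cons c t ih =>
      rw [List.foldl_cons, List.foldl_cons]
      show (t.foldl pvBMaskF (acc ++ [pvBAllZero (pvBStep d c)], pvBStep d c)).1
          = acc ++ (t.foldl pvBMaskF ([pvBAllZero (pvBStep d c)], pvBStep d c)).1
      rw [ih, ih [pvBAllZero (pvBStep d c)]]
      simp

theorem pvMask_from (t : List Char) :
    ∀ (i : Nat) (d : Int × Int × Int), i < t.length →
      ((t.foldl pvBMaskF ([], d)).1).getD i false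
        = pvBAllZero ((t.take (i + 1)).foldl pvBStep d) := by
  induction t with
  | nil => intro i d h; simp at h
  | cons c t ih =>
      intro i d h
      rw [List.foldl_cons]
      show ((t.foldl pvBMaskF ([pvBAllZero (pvBStep d c)], pvBStep d c)).1).getD i false = _
      rw [pvMask_fold_acc]
      cases i with
      | zero => simp
      | succ j =>
          have hj : j < t.length := by simpa using h
          simpa using ih j (pvBStep d c) hj

theorem pvMask_getD (t : List Char) (i : Nat) (h : i < t.length) :
    (pvBMask t).getD i false = pvBAllZero (pvDepths t (i + 1)) := by
  unfold pvBMask pvDepths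
  exact pvMask_from t i (0, 0, 0) h

-- u = upper t: a startswith match bounds the index and names the upper-cased chars
theorem pvStartsAt_len (t pat : List Char) (i : Nat)
    (hp : pvStartsAt (PySem.Chars.upper t) pat i = true) :
    pat.length ≤ t.length - i := by
  have hlen := (List.isPrefixOf_iff_prefix.mp hp).length_le
  simpa [PySem.Chars.upper] using hlen

theorem pvStartsAt_get (t pat : List Char) (i j : Nat)
    (hp : pvStartsAt (PySem.Chars.upper t) pat i = true) (hj : j < pat.length)
    (hij : i + j < t.length) :
    PySem.Chars.upperChar (t[i + j]'hij) = pat[j] := by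
  have hpre := List.isPrefixOf_iff_prefix.mp hp
  have := hpre.getElem (i := j) hj
  rw [List.getElem_drop] at this
  simp [PySem.Chars.upper] at this
  exact this.symm

-- the main invariant: A's loop with the running depths equals B's mask-gated loop
theorem pvLoop_eq (t u : List Char) (hu : u = PySem.Chars.upper t) :
    ∀ (fuel : Nat) (i : Nat) (dp db dc : Int) (iw cm : Bool),
      (dp, db, dc) = pvDepths t i →
      pvALoop t u fuel i dp db dc iw cm = pvBLoop t u (pvBMask t) fuel i iw cm := by
  intro fuel
  induction fuel with
  | zero => intro i dp db dc iw cm _; rfl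
  | succ fuel ih =>
      intro i dp db dc iw cm hd
      by_cases hi : i < t.length
      · have hstep : pvBStep (dp, db, dc) t[i] = pvDepths t (i + 1) := by
          rw [hd, ← pvDepths_succ t i hi]
        have hmask := pvMask_getD t i hi
        rw [pvALoop, pvBLoop]
        simp only [dif_pos hi, if_pos hi]
        set c := t[i] with hc
        set dp' := if c = '(' then dp + 1 else if c = ')' then max 0 (dp - 1) else dp with hdp
        set db' := if c = '[' then db + 1 else if c = ']' then max 0 (db - 1) else db with hdb
        set dc' := if c = '{' then dc + 1 else if c = '}' then max 0 (dc - 1) else dc with hdc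
        have hd' : (dp', db', dc') = pvDepths t (i + 1) := by
          rw [← hstep]; rfl
        have hcond : (dp' = 0 ∧ db' = 0 ∧ dc' = 0) ↔ ((pvBMask t).getD i false = true) := by
          rw [hmask, ← hd', pvBAllZero]
          simp
        -- skipping a matched WHEN/THEN leaves the depths unchanged
        have hskip : ∀ pat : List Char, pat = ['W','H','E','N'] ∨ pat = ['T','H','E','N'] →
            pvStartsAt u pat i = true → pvDepths t (i + 4) = pvDepths t (i + 1) := by
          intro pat hpat hs
          rw [hu] at hs
          have hlen : pat.length ≤ t.length - i := pvStartsAt_len t pat i hs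
          have hplen : pat.length = 4 := by rcases hpat with h|h <;> simp [h]
          have h1 : i + 1 < t.length := by omega
          have h2 : i + 2 < t.length := by omega
          have h3 : i + 3 < t.length := by omega
          have g1 := pvStartsAt_get t pat i 1 hs (by omega) h1
          have g2 := pvStartsAt_get t pat i 2 hs (by omega) h2
          have g3 := pvStartsAt_get t pat i 3 hs (by omega) h3
          calc pvDepths t (i + 4)
              = pvBStep (pvDepths t (i + 3)) (t[i + 3]'h3) := pvDepths_succ t (i + 3) h3
            _ = pvDepths t (i + 3) := pvBStep_fix _ _ (by
                  rw [g3]; rcases hpat with h|h <;> subst h <;> simp)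
            _ = pvBStep (pvDepths t (i + 2)) (t[i + 2]'h2) := pvDepths_succ t (i + 2) h2
            _ = pvDepths t (i + 2) := pvBStep_fix _ _ (by
                  rw [g2]; rcases hpat with h|h <;> subst h <;> simp)
            _ = pvBStep (pvDepths t (i + 1)) (t[i + 1]'h1) := pvDepths_succ t (i + 1) h1
            _ = pvDepths t (i + 1) := pvBStep_fix _ _ (by
                  rw [g1]; rcases hpat with h|h <;> subst h <;> simp)
        by_cases htop : dp' = 0 ∧ db' = 0 ∧ dc' = 0
        · rw [if_pos htop, if_pos (hcond.mp htop)]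
          by_cases hw : pvStartsAt u ['W','H','E','N'] i = true
          · rw [if_pos hw, if_pos hw]
            exact ih (i + 4) dp' db' dc' true false
              (by rw [hd', hskip _ (Or.inl rfl) hw])
          · rw [if_neg hw, if_neg hw]
            by_cases hth : (iw && pvStartsAt u ['T','H','E','N'] i) = true
            · rw [if_pos hth, if_pos hth]
              by_cases hcm : cm = true
              · simp [hcm]
              · simp only [Bool.not_eq_true] at hcm
                subst hcm
                simp only [Bool.false_eq_true, if_false]
                exact ih (i + 4) dp' db' dc' false false
                  (by rw [hd', hskip _ (Or.inr rfl) (by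
                        simp only [Bool.and_eq_true] at hth; exact hth.2)])
            · rw [if_neg hth, if_neg hth]
              have hcget : t.getD i ' ' = c := by
                simp [List.getD, List.getElem?_eq_getElem hi, hc]
              rw [hcget]
              by_cases hcomma : (iw && decide (c = ',')) = true
              · rw [if_pos hcomma, if_pos hcomma]
                exact ih (i + 1) dp' db' dc' iw true hd'
              · rw [if_neg hcomma, if_neg hcomma]
                exact ih (i + 1) dp' db' dc' iw cm hd'
        · rw [if_neg htop, if_neg (fun hh => htop (hcond.mpr hh))]
          exact ih (i + 1) dp' db' dc' iw cm hd'
      · rw [pvALoop, pvBLoop]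
        simp [hi]

-- ===== VERDICT (by name: the statement is the Claim_ definition above) =====
theorem case_when_has_multiple_values_py_spec : Claim_equal_case_when_has_multiple_values_py := by
  intro stripped _
  unfold Spec_case_when_has_multiple_values_py case_when_has_multiple_values_py case_when_has_multiple_values_py_alt
  exact pvLoop_eq stripped.toList _ rfl stripped.toList.length 0 0 0 0 false false rfl
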